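-- pv_equiv track=rewrite | github.com/lengthwisehems/retail2 | fidelity_inventory.py | determine_stretch
-- ===== SOURCE A (Python) =====
-- from typing import Any, Dict, Iterable, List, Optional, Tuple
--
-- def determine_stretch(tags: Iterable[str]) -> str:
--     tags_lower = [tag.lower() for tag in tags]
--     if any("performance stretch" in tag for tag in tags_lower):
--         return "High Stretch"
--     if any("comfort stretch" in tag for tag in tags_lower):
--         return "Stretch"
--     if any("no stretch" in tag or "traditional" in tag for tag in tags_lower):
--         return "Rigid"
--     return ""
-- ===== SOURCE B (Python) =====
-- def determine_stretch(tags):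
--     has_perf = has_comfort = has_rigid = False
--     for tag in tags:
--         t = tag.lower()
--         has_perf = has_perf or "performance stretch" in t
--         has_comfort = has_comfort or "comfort stretch" in t
--         has_rigid = has_rigid or "no stretch" in t or "traditional" in t
--     if has_perf:
--         return "High Stretch"
--     if has_comfort:
--         return "Stretch"
--     if has_rigid:
--         return "Rigid"
--     return ""
-- ===== Notes on version B (the rewrite author's own statement) =====
-- stated objective: alternative
-- what changed: Replaced A's lowercased-list build plus three independent any() scans with a single pass that accumulates three boolean flags, followed by a separate priority cascade.
import Mathlib
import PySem

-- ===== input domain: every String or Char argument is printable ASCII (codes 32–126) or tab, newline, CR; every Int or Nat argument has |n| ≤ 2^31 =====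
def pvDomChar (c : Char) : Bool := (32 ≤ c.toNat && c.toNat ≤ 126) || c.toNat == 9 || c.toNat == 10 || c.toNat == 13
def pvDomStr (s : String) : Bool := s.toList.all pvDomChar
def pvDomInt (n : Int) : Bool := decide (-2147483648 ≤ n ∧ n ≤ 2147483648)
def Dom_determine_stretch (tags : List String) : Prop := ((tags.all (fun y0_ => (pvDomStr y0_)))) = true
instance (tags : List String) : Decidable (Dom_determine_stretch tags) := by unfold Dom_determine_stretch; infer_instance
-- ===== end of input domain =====

-- B replaces three independent any() scans over a prebuilt lowercased list by one
-- flag-accumulating pass followed by a priority cascade (alternative decomposition, same cost).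


-- ===== PORT A =====
def determine_stretch (tags : List String) : String :=
  let tags_lower := tags.map (fun tag => PySem.Str.lower tag)
  if tags_lower.any (fun tag => PySem.Str.isIn "performance stretch" tag) then "High Stretch"
  else if tags_lower.any (fun tag => PySem.Str.isIn "comfort stretch" tag) then "Stretch"
  else if tags_lower.any (fun tag => PySem.Str.isIn "no stretch" tag || PySem.Str.isIn "traditional" tag) then "Rigid"
  else ""

-- ===== PORT B =====
def determine_stretch_step (f : Bool × Bool × Bool) (tag : String) : Bool × Bool × Bool :=
  let t := PySem.Str.lower tag
  (f.1 || PySem.Str.isIn "performance stretch" t,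
   f.2.1 || PySem.Str.isIn "comfort stretch" t,
   f.2.2 || PySem.Str.isIn "no stretch" t || PySem.Str.isIn "traditional" t)

def determine_stretch_alt (tags : List String) : String :=
  let flags := tags.foldl determine_stretch_step (false, false, false)
  if flags.1 then "High Stretch"
  else if flags.2.1 then "Stretch"
  else if flags.2.2 then "Rigid"
  else ""

-- ===== PRECONDITION & SPEC =====
def Spec_determine_stretch (tags : List String) (out : String) : Prop := out = determine_stretch_alt tags
instance (tags : List String) (out : String) : Decidable (Spec_determine_stretch tags out) := by unfold Spec_determine_stretch; infer_instance

-- ===== CLAIM (what is proved, stated in full; the proofs are below) =====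
def Claim_equal_determine_stretch : Prop := ∀ (tags : List String), Dom_determine_stretch tags → Spec_determine_stretch tags (determine_stretch tags)

-- ===== LEMMAS AND PROOFS =====
-- The flag fold computes exactly the three any-scans of A, or-ed onto the accumulator.
lemma determine_stretch_fold_eq (tags : List String) (a b c : Bool) :
    tags.foldl determine_stretch_step (a, b, c) =
      (a || tags.any (fun t => PySem.Str.isIn "performance stretch" (PySem.Str.lower t)),
       b || tags.any (fun t => PySem.Str.isIn "comfort stretch" (PySem.Str.lower t)),
       c || tags.any (fun t => PySem.Str.isIn "no stretch" (PySem.Str.lower t) ||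
              PySem.Str.isIn "traditional" (PySem.Str.lower t))) := by
  induction tags generalizing a b c with
  | nil => simp
  | cons h t ih =>
    simp only [List.foldl_cons, List.any_cons, determine_stretch_step, ih]
    simp [Bool.or_assoc]

-- ===== VERDICT (by name: the statement is the Claim_ definition above) =====
theorem determine_stretch_spec : Claim_equal_determine_stretch := by
  intro tags _
  unfold Spec_determine_stretch determine_stretch determine_stretch_alt
  rw [determine_stretch_fold_eq]
  simp [List.any_map, Function.comp_def]
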